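-- pv_equiv track=rewrite | github.com/venux021/soda | zcy2/c9/q03.py | one_location
-- ===== SOURCE A (Python) =====
-- def one_location(n):
--     if n <= 0:
--         return -1
--     res = 0
--     while n > 0:
--         n >>= 1
--         res += n
--     return res
-- ===== SOURCE B (Python) =====
-- def one_location(n):
--     if n <= 0:
--         return -1
--     return n - n.bit_count()
-- ===== Notes on version B (the rewrite author's own statement) =====
-- stated objective: simpler
-- what changed: Replaces the while-loop summing successive right shifts with the closed form n minus popcount(n), computed by a single built-in bit_count call instead of iterating over bit positions.
import Mathlib
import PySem

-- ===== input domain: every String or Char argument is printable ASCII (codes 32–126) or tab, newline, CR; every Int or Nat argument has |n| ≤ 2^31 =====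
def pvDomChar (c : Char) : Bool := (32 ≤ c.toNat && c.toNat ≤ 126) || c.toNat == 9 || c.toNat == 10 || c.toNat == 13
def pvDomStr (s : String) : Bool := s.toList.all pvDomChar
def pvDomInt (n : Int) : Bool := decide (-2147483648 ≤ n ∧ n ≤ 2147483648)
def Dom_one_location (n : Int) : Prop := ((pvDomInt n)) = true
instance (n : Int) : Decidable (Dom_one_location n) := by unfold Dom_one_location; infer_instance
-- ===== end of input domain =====

-- B replaces the shift-and-sum loop with the closed form n - popcount(n); no loop at Python level.

-- ===== PORT A =====
-- the 'while n > 0: n >>= 1; res += n' loop, step for step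
def oneLocLoop (n res : Int) : Int :=
  if 0 < n then oneLocLoop (n >>> (1 : Nat)) (res + n >>> (1 : Nat)) else res
termination_by n.toNat
decreasing_by
  have h2 : n >>> (1 : Nat) = n / 2 := by
    rw [Int.shiftRight_eq_div_pow]; norm_num
  omega

def one_location (n : Int) : Int :=
  if n ≤ 0 then -1 else oneLocLoop n 0

-- ===== PORT B =====
def one_location_alt (n : Int) : Int :=
  if n ≤ 0 then -1 else n - (PySem.Int.bitCount n : Int)

-- ===== PRECONDITION & SPEC =====
def Spec_one_location (n : Int) (out : Int) : Prop := out = one_location_alt n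
instance (n : Int) (out : Int) : Decidable (Spec_one_location n out) := by unfold Spec_one_location; infer_instance

-- ===== CLAIM (what is proved, stated in full; the proofs are below) =====
def Claim_equal_one_location : Prop := ∀ (n : Int), Dom_one_location n → Spec_one_location n (one_location n)

-- ===== LEMMAS AND PROOFS =====

theorem shiftRight_one_int (n : Int) : n >>> (1 : Nat) = n / 2 := by
  rw [Int.shiftRight_eq_div_pow]; norm_num

-- loop invariant: for 0 ≤ n, the loop returns res + n - popcount n
theorem oneLocLoop_eq (n res : Int) (hn : 0 ≤ n) :
    oneLocLoop n res = res + n - (PySem.Int.bitCount n : Int) := by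
  induction hk : n.toNat using Nat.strong_induction_on generalizing n res with
  | _ k ih => ?_
  subst hk
  rw [oneLocLoop]
  by_cases h : 0 < n
  · simp only [if_pos h]
    have hfd : PySem.Int.floordiv n 2 = n / 2 := PySem.Int.floordiv_eq_ediv_of_pos (by omega)
    have hmod : PySem.Int.mod n 2 = n % 2 := PySem.Int.mod_eq_emod_of_pos (by omega)
    have hbc := PySem.Int.bitCount_of_pos (n := n) h
    rw [hfd, hmod] at hbc
    rw [shiftRight_one_int]
    rw [ih (n / 2).toNat (by omega) (n / 2) (res + n / 2) (by omega) rfl]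
    have hm : (0:Int) ≤ n % 2 ∧ n % 2 < 2 := ⟨Int.emod_nonneg n (by norm_num), Int.emod_lt_of_pos n (by norm_num)⟩
    have hdm : n / 2 * 2 + n % 2 = n := Int.ediv_mul_add_emod n 2
    rw [hbc]
    push_cast
    omega
  · simp only [if_neg h]
    have hn0 : n = 0 := by omega
    subst hn0
    simp [PySem.Int.bitCount_zero]

-- ===== VERDICT (by name: the statement is the Claim_ definition above) =====
theorem one_location_spec : Claim_equal_one_location := by
  intro n _
  unfold Spec_one_location one_location one_location_alt
  by_cases h : n ≤ 0
  · simp [h]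
  · simp only [if_neg h]
    rw [oneLocLoop_eq n 0 (by omega)]
    ring
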